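-- pv_equiv track=rewrite | github.com/bbksu/hr_py3 | data_structures/ds5/main.py | stackable_cube
-- ===== SOURCE A (Python) =====
-- def stack(lengths, cubes):
--     if lengths[0] >= lengths[-1]:
--         cubes.append(lengths[0])
--         lengths.pop(0)
--     else:
--         cubes.append(lengths[-1])
--         lengths.pop(-1)
--     return lengths
--
-- def stackable_cube(lengths):
--     cubes = []
--     while True:
--         if len(lengths) == 0:
--             if sorted(cubes, reverse=True) == cubes:
--                 return "Yes"
--             else:
--                 return "No"
--         lengths = stack(lengths, cubes)
-- ===== SOURCE B (Python) =====
-- def stackable_cube(lengths):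
--     # Two pointers over the ends; check non-increasing incrementally. O(n),
--     # and does not mutate the input list (A empties it via pop).
--     i, j = 0, len(lengths) - 1
--     prev = None
--     while i <= j:
--         if lengths[i] >= lengths[j]:
--             v = lengths[i]
--             i += 1
--         else:
--             v = lengths[j]
--             j -= 1
--         if prev is not None and v > prev:
--             return "No"
--         prev = v
--     return "Yes"
-- ===== Notes on version B (the rewrite author's own statement) =====
-- stated objective: faster
-- what changed: Replaces the pop-from-list loop plus final sort-and-compare with a two-pointer scan from both ends that checks non-increasing order incrementally (early exit on the first violation); B also does not mutate the input list, while A empties it.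
import Mathlib
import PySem

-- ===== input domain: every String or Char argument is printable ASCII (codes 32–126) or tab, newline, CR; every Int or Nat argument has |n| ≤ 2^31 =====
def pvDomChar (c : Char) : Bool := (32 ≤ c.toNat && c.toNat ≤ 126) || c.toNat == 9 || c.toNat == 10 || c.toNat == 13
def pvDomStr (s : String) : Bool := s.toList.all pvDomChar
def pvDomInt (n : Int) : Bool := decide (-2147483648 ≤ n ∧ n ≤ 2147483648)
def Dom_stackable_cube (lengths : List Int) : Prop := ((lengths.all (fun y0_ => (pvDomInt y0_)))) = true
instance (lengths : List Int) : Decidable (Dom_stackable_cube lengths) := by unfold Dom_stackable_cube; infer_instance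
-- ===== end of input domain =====

-- B replaces A's pop-from-list loop + final sort-and-compare with a two-pointer
-- scan checking non-increasing order incrementally (return value only: A empties
-- the caller's list via pop, B does not mutate it).


-- ===== PORT A =====
-- stack(lengths, cubes): append the larger end to cubes, pop it from lengths.
-- lengths.pop(0) = tail, lengths.pop(-1) = dropLast (exact: lengths is nonempty here).
def pvStack (lengths cubes : List Int) : List Int × List Int :=
  if PySem.List.pyGetD lengths 0 0 ≥ PySem.List.pyGetD lengths (-1) 0 then
    (lengths.tail, cubes ++ [PySem.List.pyGetD lengths 0 0])
  else
    (lengths.dropLast, cubes ++ [PySem.List.pyGetD lengths (-1) 0])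

lemma pvStack_fst_length (lengths cubes : List Int) (h : ¬ lengths.length = 0) :
    (pvStack lengths cubes).1.length < lengths.length := by
  unfold pvStack; split <;> simp <;> omega

-- the 'while True' loop of stackable_cube
def pvStackLoop (lengths cubes : List Int) : String :=
  if _h : lengths.length = 0 then
    if PySem.List.sorted cubes (fun x => x) true = cubes then "Yes" else "No"
  else
    pvStackLoop (pvStack lengths cubes).1 (pvStack lengths cubes).2
termination_by lengths.length
decreasing_by exact pvStack_fst_length _ _ _h

def stackable_cube (lengths : List Int) : String := pvStackLoop lengths []

-- ===== PORT B =====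
-- two-pointer while loop of Source B: i, j are the two ends, prev the last pile value
def pvAltLoop (xs : List Int) (i j : Int) (prev : Option Int) : String :=
  if _h : i ≤ j then
    let c := PySem.List.pyGetD xs i 0 ≥ PySem.List.pyGetD xs j 0
    let v := if c then PySem.List.pyGetD xs i 0 else PySem.List.pyGetD xs j 0
    let i' := if c then i + 1 else i
    let j' := if c then j else j - 1
    if (match prev with | some p => decide (v > p) | none => false) then "No"
    else pvAltLoop xs i' j' (some v)
  else "Yes"
termination_by (j + 1 - i).toNat
decreasing_by split <;> omega

def stackable_cube_alt (lengths : List Int) : String :=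
  pvAltLoop lengths 0 (lengths.length - 1) none

-- ===== PRECONDITION & SPEC =====
def Spec_stackable_cube (lengths : List Int) (out : String) : Prop := out = stackable_cube_alt lengths
instance (lengths : List Int) (out : String) : Decidable (Spec_stackable_cube lengths out) := by unfold Spec_stackable_cube; infer_instance

-- ===== CLAIM (what is proved, stated in full; the proofs are below) =====
def Claim_equal_stackable_cube : Prop := ∀ (lengths : List Int), Dom_stackable_cube lengths → Spec_stackable_cube lengths (stackable_cube lengths)

-- ===== LEMMAS AND PROOFS =====

-- the sequence of cube sizes the greedy end-picking produces
def pvPicks (l : List Int) : List Int :=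
  if h : l = [] then []
  else if l.head h ≥ l.getLast h then l.head h :: pvPicks l.tail
  else l.getLast h :: pvPicks l.dropLast
termination_by l.length
decreasing_by all_goals (cases l with | nil => exact absurd rfl h | cons x t => simp)

lemma pv_sortedRev_iff (cubes : List Int) :
    PySem.List.sorted cubes (fun x => x) true = cubes ↔
      List.Pairwise (fun a b : Int => b ≤ a) cubes := by
  constructor
  · intro h
    have := PySem.List.sorted_pairwise_rev (xs := cubes) (key := fun x : Int => x)
    rwa [h] at this
  · intro h
    exact PySem.List.sorted_rev_eq_self_of_pairwise cubes (fun x => x) h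

lemma pvPicks_nil : pvPicks ([] : List Int) = [] := by
  rw [pvPicks]; simp

lemma pvPicks_step (l : List Int) (h : ¬ l.length = 0) (cubes : List Int) :
    (pvStack l cubes).2 ++ pvPicks (pvStack l cubes).1 = cubes ++ pvPicks l := by
  have hne : l ≠ [] := by simpa [List.length_eq_zero_iff] using h
  have hhead : PySem.List.pyGetD l 0 0 = l.head hne := by
    cases l with
    | nil => exact absurd rfl hne
    | cons x t => simp [PySem.List.pyGetD_zero_cons]
  have hlast : PySem.List.pyGetD l (-1) 0 = l.getLast hne :=
    PySem.List.pyGetD_neg_one l 0 hne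
  rw [pvStack]
  conv_rhs => rw [pvPicks, dif_neg hne]
  rw [hhead, hlast]
  split <;> simp

lemma pvA_base (cubes : List Int) :
    (if PySem.List.sorted cubes (fun x => x) true = cubes then "Yes" else "No") =
      if List.IsChain (fun a b : Int => b ≤ a) cubes then "Yes" else "No" := by
  by_cases hc : List.Pairwise (fun a b : Int => b ≤ a) cubes
  · rw [if_pos ((pv_sortedRev_iff cubes).mpr hc), if_pos (List.isChain_iff_pairwise.mpr hc)]
  · rw [if_neg (fun hs => hc ((pv_sortedRev_iff cubes).mp hs)),
      if_neg (fun hs => hc (List.IsChain.pairwise hs))]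

lemma pvA_char (l cubes : List Int) :
    pvStackLoop l cubes =
      if List.IsChain (fun a b : Int => b ≤ a) (cubes ++ pvPicks l) then "Yes" else "No" := by
  have hgen : ∀ (m : Nat) (l cubes : List Int), l.length ≤ m →
      pvStackLoop l cubes =
        if List.IsChain (fun a b : Int => b ≤ a) (cubes ++ pvPicks l) then "Yes" else "No" := by
    intro m
    induction m with
    | zero =>
      intro l cubes hm
      have hne : l = [] := by cases l with | nil => rfl | cons x t => simp at hm
      subst hne
      rw [pvStackLoop]
      simp only [List.length_nil]
      rw [dif_pos trivial, pvPicks_nil, List.append_nil]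
      exact pvA_base cubes
    | succ m ihm =>
      intro l cubes hm
      by_cases h : l.length = 0
      · have hne : l = [] := List.length_eq_zero_iff.mp h
        subst hne
        rw [pvStackLoop]
        simp only [List.length_nil]
        rw [dif_pos trivial, pvPicks_nil, List.append_nil]
        exact pvA_base cubes
      · have hlt := pvStack_fst_length l cubes h
        rw [pvStackLoop, dif_neg h,
          ihm (pvStack l cubes).1 (pvStack l cubes).2 (by omega),
          pvPicks_step l h cubes]
  exact hgen l.length l cubes (le_refl _)

lemma pvB_char (xs : List Int) (i j : Int) (prev : Option Int)
    (hi : 0 ≤ i) (hj : j < (xs.length : Int)) :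
    pvAltLoop xs i j prev =
      if List.IsChain (fun a b : Int => b ≤ a)
          (prev.toList ++ pvPicks ((xs.drop i.toNat).take (j + 1 - i).toNat))
        then "Yes" else "No" := by
  have hgen : ∀ (m : Nat) (i j : Int) (prev : Option Int), (j + 1 - i).toNat ≤ m →
      0 ≤ i → j < (xs.length : Int) →
      pvAltLoop xs i j prev =
        if List.IsChain (fun a b : Int => b ≤ a)
            (prev.toList ++ pvPicks ((xs.drop i.toNat).take (j + 1 - i).toNat))
          then "Yes" else "No" := by
    intro m
    induction m with
    | zero =>
      intro i j prev hm hi hj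
      have hij : ¬ i ≤ j := by omega
      have hk : (j + 1 - i).toNat = 0 := by omega
      rw [pvAltLoop, dif_neg hij, hk]
      rw [pvPicks, dif_pos (by simp)]
      cases prev <;> simp
    | succ m ihm =>
      intro i j prev hm hi hj
      by_cases hij : i ≤ j
      · -- the sublist xs[i..j] is nonempty
        have hin : i < (xs.length : Int) := by omega
        have hsubne : (xs.drop i.toNat).take (j + 1 - i).toNat ≠ [] := by
          apply List.ne_nil_of_length_pos
          simp only [List.length_take, List.length_drop]
          omega
        have hhead : PySem.List.pyGetD xs i 0 =
            ((xs.drop i.toNat).take (j + 1 - i).toNat).head hsubne := by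
          rw [PySem.List.pyGetD_eq_getElem xs 0 hi hin, List.head_eq_getElem,
            List.getElem_take, List.getElem_drop]
          simp
        have hlast : PySem.List.pyGetD xs j 0 =
            ((xs.drop i.toNat).take (j + 1 - i).toNat).getLast hsubne := by
          rw [PySem.List.pyGetD_eq_getElem xs 0 (by omega : (0:Int) ≤ j) hj,
            List.getLast_eq_getElem]
          have hlen : ((xs.drop i.toNat).take (j + 1 - i).toNat).length
              = (j + 1 - i).toNat := by
            simp [List.length_take, List.length_drop]; omega
          simp only [List.getElem_take, List.getElem_drop, hlen]
          congr 1; omega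
        have htail : ((xs.drop i.toNat).take (j + 1 - i).toNat).tail
            = (xs.drop (i + 1).toNat).take (j + 1 - (i + 1)).toNat := by
          rcases hd : xs.drop i.toNat with _ | ⟨y, t⟩
          · rw [hd] at hsubne; simp at hsubne
          · have : xs.drop (i + 1).toNat = t := by
              have h1 : (i + 1).toNat = i.toNat + 1 := by omega
              rw [h1, ← List.drop_drop, hd]; simp
            rw [this]
            rcases hk : (j + 1 - i).toNat with _ | k
            · omega
            · have : (j + 1 - (i + 1)).toNat = k := by omega
              rw [this]; simp
        have hdroplast : ((xs.drop i.toNat).take (j + 1 - i).toNat).dropLast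
            = (xs.drop i.toNat).take (j - 1 + 1 - i).toNat := by
          rw [List.dropLast_eq_take, List.take_take]
          congr 1
          have hlen : (xs.drop i.toNat).length = xs.length - i.toNat := by simp
          simp [hlen]; omega
        rw [pvAltLoop, dif_pos hij]
        simp only []
        rw [pvPicks, dif_neg hsubne, ← hhead, ← hlast]
        by_cases hc : PySem.List.pyGetD xs i 0 ≥ PySem.List.pyGetD xs j 0
        · simp only [if_pos hc, htail]
          rw [ihm (i + 1) j (some (PySem.List.pyGetD xs i 0)) (by omega) (by omega) hj]
          cases prev with
          | none => simp
          | some p =>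
            by_cases hvp : PySem.List.pyGetD xs i 0 > p
            · simp only [decide_eq_true_eq, if_pos hvp]
              rw [if_neg]
              intro hch
              simp only [Option.toList_some, List.cons_append, List.nil_append, List.isChain_cons_cons] at hch
              exact absurd hch.1 (by omega)
            · simp only [decide_eq_true_eq, if_neg hvp]
              congr 1
              simp only [Option.toList_some, List.cons_append, List.nil_append,
                List.isChain_cons_cons]
              rw [eq_iff_iff]
              constructor
              · intro hch; exact ⟨by omega, hch⟩
              · exact fun hch => hch.2
        · simp only [if_neg hc, hdroplast]
          rw [ihm i (j - 1) (some (PySem.List.pyGetD xs j 0)) (by omega) hi (by omega)]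
          cases prev with
          | none => simp
          | some p =>
            by_cases hvp : PySem.List.pyGetD xs j 0 > p
            · simp only [decide_eq_true_eq, if_pos hvp]
              rw [if_neg]
              intro hch
              simp only [Option.toList_some, List.cons_append, List.nil_append, List.isChain_cons_cons] at hch
              exact absurd hch.1 (by omega)
            · simp only [decide_eq_true_eq, if_neg hvp]
              congr 1
              simp only [Option.toList_some, List.cons_append, List.nil_append,
                List.isChain_cons_cons]
              rw [eq_iff_iff]
              constructor
              · intro hch; exact ⟨by omega, hch⟩
              · exact fun hch => hch.2
      · have hk : (j + 1 - i).toNat = 0 := by omega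
        rw [pvAltLoop, dif_neg hij, hk]
        rw [pvPicks, dif_pos (by simp)]
        cases prev <;> simp
  exact hgen (j + 1 - i).toNat i j prev (le_refl _) hi hj

-- ===== VERDICT (by name: the statement is the Claim_ definition above) =====
theorem stackable_cube_spec : Claim_equal_stackable_cube := by
  intro lengths _
  show stackable_cube lengths = stackable_cube_alt lengths
  rw [stackable_cube, stackable_cube_alt, pvA_char,
    pvB_char lengths 0 ((lengths.length : Int) - 1) none (le_refl 0) (by omega)]
  simp
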